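-- pv_equiv track=rewrite | github.com/YoungHo-K/problem-solving | 프로그래머스/1/64061. 크레인 인형뽑기 게임/크레인 인형뽑기 게임.py | solution
-- ===== SOURCE A (Python) =====
-- from collections import defaultdict
--
-- def solution(board, moves):
--     board_dict = defaultdict(list)
--     for j in range(len(board[0])):
--         for i in range(len(board) - 1, -1, -1):
--             if board[i][j] != 0:
--                 board_dict[j].append(board[i][j])
--
--     answer = 0
--     stack = []
--     for index in moves:
--         if board_dict[index - 1]:
--             value = board_dict[index - 1].pop()
--             if stack and (stack[-1] == value):
--                 stack.pop()
--                 answer += 2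
--             else:
--                 stack.append(value)
--
--     return answer
-- ===== SOURCE B (Python) =====
-- def solution(board, moves):
--     grid = [row[:] for row in board]
--     width = len(grid[0])
--     answer = 0
--     stack = []
--     for move in moves:
--         col = move - 1
--         if col < 0 or col >= width:
--             continue
--         for row in grid:
--             if row[col] != 0:
--                 value = row[col]
--                 row[col] = 0
--                 if stack and stack[-1] == value:
--                     stack.pop()
--                     answer += 2
--                 else:
--                     stack.append(value)
--                 break
--     return answer
-- ===== Notes on version B (the rewrite author's own statement) =====
-- stated objective: alternative
-- what changed: B drops A's precomputed defaultdict of per-column stacks entirely: it keeps a local copy of the board and, for each move, scans that column top-down for the first nonzero cell, records it and zeroes it in place, feeding the value into the same basket stack.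
import Mathlib
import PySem

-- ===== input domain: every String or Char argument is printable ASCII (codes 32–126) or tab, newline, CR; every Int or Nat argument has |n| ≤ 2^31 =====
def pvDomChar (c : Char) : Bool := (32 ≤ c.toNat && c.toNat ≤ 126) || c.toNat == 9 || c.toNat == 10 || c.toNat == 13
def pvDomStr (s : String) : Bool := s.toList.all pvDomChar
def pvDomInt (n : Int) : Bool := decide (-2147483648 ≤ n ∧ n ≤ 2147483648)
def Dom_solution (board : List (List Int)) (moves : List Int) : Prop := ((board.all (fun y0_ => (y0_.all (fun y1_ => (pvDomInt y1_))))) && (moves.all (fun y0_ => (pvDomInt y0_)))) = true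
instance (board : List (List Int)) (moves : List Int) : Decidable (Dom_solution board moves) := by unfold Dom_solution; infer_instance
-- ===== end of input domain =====

-- B is an alternative decomposition: no precomputed column index; each move scans its column
-- top-down in a local copy of the board and zeroes the picked cell (neither version mutates the argument).

-- ===== PORT A =====
-- inner loop body of the dict-building pass: for i in range(len(board)-1,-1,-1): if board[i][j] != 0: board_dict[j].append(...)
def innerStep (board : List (List Int)) (j : Int) (d : PySem.Dict Int (List Int)) (i : Int) : PySem.Dict Int (List Int) :=
  let v := PySem.List.pyGetD (PySem.List.pyGetD board i []) j 0
  if v ≠ 0 then d.modify j [] (· ++ [v]) else d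

-- board_dict built by the double loop (defaultdict(list); append = modify with default [])
def buildDict (board : List (List Int)) : PySem.Dict Int (List Int) :=
  (PySem.List.pyRange 0 ((PySem.List.pyGetD board 0 []).length : Int) 1).foldl
    (fun d j => (PySem.List.pyRange ((board.length : Int) - 1) (-1) (-1)).foldl (innerStep board j) d)
    PySem.Dict.empty

-- body of A's moves loop; state = (board_dict, answer, stack); pop() = getLast?/dropLast
def stepA (st : PySem.Dict Int (List Int) × Int × List Int) (m : Int) :
    PySem.Dict Int (List Int) × Int × List Int :=
  match (st.1.getD (m - 1) []).getLast? with
  | some value =>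
    let d' := st.1.insert (m - 1) (st.1.getD (m - 1) []).dropLast
    if st.2.2 ≠ [] ∧ st.2.2.getLast? = some value then (d', st.2.1 + 2, st.2.2.dropLast)
    else (d', st.2.1, st.2.2 ++ [value])
  | none => st

def solution (board : List (List Int)) (moves : List Int) : Int :=
  (moves.foldl stepA (buildDict board, 0, ([] : List Int))).2.1

-- ===== PORT B =====
-- scan the rows top-down for the first nonzero entry of column c; zero it (row[col] = 0)
def pickB (c : Int) : List (List Int) → Option (Int × List (List Int))
  | [] => none
  | row :: rest =>
    match PySem.List.pyGet? row c with
    | some v =>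
      if v ≠ 0 then some (v, row.set c.toNat 0 :: rest)
      else
        match pickB c rest with
        | some (v', rest') => some (v', row :: rest')
        | none => none
    | none => none        -- row[col] would raise IndexError (ragged row, outside Pre_)

-- body of B's moves loop; state = (grid, answer, stack)
def stepB (width : Nat) (st : List (List Int) × Int × List Int) (m : Int) :
    List (List Int) × Int × List Int :=
  let c := m - 1
  if c < 0 ∨ (width : Int) ≤ c then st
  else
    match pickB c st.1 with
    | none => st
    | some (v, g') =>
      if st.2.2 ≠ [] ∧ st.2.2.getLast? = some v then (g', st.2.1 + 2, st.2.2.dropLast)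
      else (g', st.2.1, st.2.2 ++ [v])

def solution_alt (board : List (List Int)) (moves : List Int) : Int :=
  (moves.foldl (stepB (PySem.List.pyGetD board 0 []).length) (board, 0, ([] : List Int))).2.1

-- ===== PRECONDITION & SPEC =====
-- Pre_ excludes exactly the inputs where the Python A raises: an empty board (board[0] → IndexError)
-- and ragged boards with a row shorter than the first row (board[i][j] → IndexError).
def Pre_solution (board : List (List Int)) (moves : List Int) : Prop :=
  board ≠ [] ∧ ∀ row ∈ board, (board.headD []).length ≤ row.length
instance (board : List (List Int)) (moves : List Int) : Decidable (Pre_solution board moves) := by unfold Pre_solution; infer_instance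
def pvWitness_solution : List (List Int) × List Int := ([[0, 1], [2, 3]], [1, 2, 1, 2])

def Spec_solution (board : List (List Int)) (moves : List Int) (out : Int) : Prop := out = solution_alt board moves
instance (board : List (List Int)) (moves : List Int) (out : Int) : Decidable (Spec_solution board moves out) := by unfold Spec_solution; infer_instance

-- ===== CLAIM (what is proved, stated in full; the proofs are below) =====
def Claim_equal_solution : Prop := ∀ (board : List (List Int)) (moves : List Int), Dom_solution board moves → Pre_solution board moves → Spec_solution board moves (solution board moves)

-- ===== LEMMAS AND PROOFS =====

-- column c of grid read top-down, zeros dropped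
def colF (c : Int) (g : List (List Int)) : List Int :=
  (g.map (fun r => PySem.List.pyGetD r c 0)).filter (fun v => v ≠ 0)

-- contents of A's dict entry c (bottom-up), as a function of the remaining grid
def colOf (w : Nat) (g : List (List Int)) (c : Int) : List Int :=
  if 0 ≤ c ∧ c < (w : Int) then (colF c g).reverse else []

theorem pyGetD_toNat (xs : List Int) (i d : Int) (h : 0 ≤ i) :
    PySem.List.pyGetD xs i d = xs.getD i.toNat d := by
  by_cases hl : i < (xs.length : Int) <;>
    simp [PySem.List.pyGetD, PySem.List.pyGet?, PySem.List.pyIdx?, h, hl, List.getD_eq_getElem?_getD]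

theorem pyGet?_toNat (xs : List Int) (i : Int) (h0 : 0 ≤ i) (h : i.toNat < xs.length) :
    PySem.List.pyGet? xs i = some xs[i.toNat] := by
  simp [PySem.List.pyGet?, PySem.List.pyIdx?, h0, h, show i < (xs.length : Int) by omega]

theorem inner_getD (board : List (List Int)) (j c : Int) :
    ∀ (L : List Int) (d : PySem.Dict Int (List Int)),
      (L.foldl (innerStep board j) d).getD c []
        = if c = j then d.getD j [] ++ (L.map (fun i => PySem.List.pyGetD (PySem.List.pyGetD board i []) j 0)).filter (fun v => v ≠ 0) else d.getD c [] := by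
  intro L
  induction L with
  | nil => intro d; by_cases h : c = j <;> simp [h]
  | cons i L ih =>
    intro d
    rw [List.foldl_cons, ih]
    by_cases hcj : c = j <;>
      simp only [innerStep, hcj, if_pos, List.map_cons, List.filter_cons] <;>
      by_cases hv : PySem.List.pyGetD (PySem.List.pyGetD board i []) j 0 ≠ 0 <;>
      simp [hv, PySem.Dict.getD_modify, hcj]

theorem outer_getD (board : List (List Int)) (c : Int) :
    ∀ (J : List Int), J.Nodup → ∀ d : PySem.Dict Int (List Int),
      ((J.foldl (fun d j => (PySem.List.pyRange ((board.length : Int) - 1) (-1) (-1)).foldl (innerStep board j) d) d).getD c [])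
        = if c ∈ J then
            d.getD c [] ++ ((PySem.List.pyRange ((board.length : Int) - 1) (-1) (-1)).map (fun i => PySem.List.pyGetD (PySem.List.pyGetD board i []) c 0)).filter (fun v => v ≠ 0)
          else d.getD c [] := by
  intro J
  induction J with
  | nil => simp
  | cons j J ih =>
    intro hnd d
    have hj : j ∉ J := (List.nodup_cons.mp hnd).1
    rw [List.foldl_cons, ih (List.nodup_cons.mp hnd).2, inner_getD]
    by_cases hcj : c = j
    · subst hcj
      simp [hj, List.mem_cons]
    · simp [hcj, List.mem_cons]

theorem build_getD (board : List (List Int)) (c : Int) :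
    (buildDict board).getD c [] = colOf (PySem.List.pyGetD board 0 []).length board c := by
  unfold buildDict
  rw [outer_getD board c _ (PySem.List.nodup_pyRange_one _ _) PySem.Dict.empty]
  have hrange : PySem.List.pyRange ((board.length : Int) - 1) (-1) (-1)
      = (PySem.List.pyRange 0 (board.length : Int) 1).reverse := by
    rw [PySem.List.pyRange_neg_one_eq_reverse]; norm_num
  have hmap : (PySem.List.pyRange 0 (board.length : Int) 1).map (fun i => PySem.List.pyGetD (PySem.List.pyGetD board i []) c 0)
      = board.map (fun r => PySem.List.pyGetD r c 0) := by
    rw [show (fun i => PySem.List.pyGetD (PySem.List.pyGetD board i []) c 0)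
          = (fun r => PySem.List.pyGetD r c 0) ∘ (fun i => PySem.List.pyGetD board i []) from rfl,
        ← List.map_map, PySem.List.map_pyGetD_pyRange_zero']
  rw [hrange, List.map_reverse, List.filter_reverse, hmap]
  by_cases hc : 0 ≤ c ∧ c < ((PySem.List.pyGetD board 0 []).length : Int) <;>
    simp [colOf, colF, PySem.List.mem_pyRange_one, hc]

theorem pick_spec (c : Int) (w : Nat) (hc0 : 0 ≤ c) (hcw : c < (w : Int)) :
    ∀ (g : List (List Int)), (∀ r ∈ g, w ≤ r.length) →
      (pickB c g = none → colF c g = []) ∧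
      (∀ v g', pickB c g = some (v, g') →
        colF c g = v :: colF c g' ∧
        (∀ c' : Int, c' ≠ c → 0 ≤ c' → colF c' g' = colF c' g) ∧
        (∀ r ∈ g', w ≤ r.length)) := by
  intro g
  induction g with
  | nil =>
    intro _
    refine ⟨fun _ => by simp [colF], fun v g' h => by simp [pickB] at h⟩
  | cons row rest ih =>
    intro hshape
    have hrow : w ≤ row.length := hshape row (by simp)
    have hct : c.toNat < row.length := by omega
    have hget : PySem.List.pyGet? row c = some row[c.toNat] := pyGet?_toNat row c hc0 hct
    have hgetD : PySem.List.pyGetD row c 0 = row[c.toNat] := by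
      rw [pyGetD_toNat row c 0 hc0, List.getD_eq_getElem?_getD, List.getElem?_eq_getElem hct]; rfl
    obtain ⟨ihn, ihs⟩ := ih (fun r hr => hshape r (by simp [hr]))
    by_cases hv : row[c.toNat] = 0
    · -- this row contributes nothing to column c; pickB recurses
      have hpick : pickB c (row :: rest) =
          match pickB c rest with
          | some (v', rest') => some (v', row :: rest')
          | none => none := by
        simp [pickB, hget, hv]
      have hcolF : colF c (row :: rest) = colF c rest := by
        simp [colF, List.filter_cons, hgetD, hv]
      cases hp : pickB c rest with
      | none =>
        rw [hp] at hpick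
        refine ⟨fun _ => by rw [hcolF]; exact ihn hp, fun v g' h => ?_⟩
        rw [hpick] at h; exact absurd h (by simp)
      | some pr =>
        obtain ⟨v0, rest'⟩ := pr
        rw [hp] at hpick
        obtain ⟨h1, h2, h3⟩ := ihs v0 rest' hp
        refine ⟨fun h => by rw [hpick] at h; exact absurd h (by simp), fun v g' h => ?_⟩
        rw [hpick] at h
        cases h
        have hcolF' : ∀ c'' : Int, colF c'' (row :: rest') =
            (if PySem.List.pyGetD row c'' 0 ≠ 0 then [PySem.List.pyGetD row c'' 0] else []) ++ colF c'' rest' := by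
          intro c''; by_cases h'' : PySem.List.pyGetD row c'' 0 ≠ 0 <;> simp [colF, List.filter_cons, h'']
        refine ⟨?_, ?_, ?_⟩
        · rw [hcolF, h1, hcolF' c]
          simp [hgetD, hv]
        · intro c' hne h0
          rw [hcolF' c', h2 c' hne h0]
          by_cases h'' : PySem.List.pyGetD row c' 0 ≠ 0 <;> simp [colF, List.filter_cons, h'']
        · intro r hr
          rcases List.mem_cons.mp hr with rfl | hr
          · exact hrow
          · exact h3 r hr
    · -- first nonzero found here
      have hpick : pickB c (row :: rest) = some (row[c.toNat], row.set c.toNat 0 :: rest) := by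
        simp [pickB, hget, hv]
      refine ⟨fun h => by rw [hpick] at h; exact absurd h (by simp), fun v g' h => ?_⟩
      rw [hpick] at h
      cases h
      have hset0 : PySem.List.pyGetD (row.set c.toNat 0) c 0 = 0 := by
        rw [pyGetD_toNat _ c 0 hc0, List.getD_eq_getElem?_getD, List.getElem?_set_self (by simpa using hct)]; rfl
      refine ⟨?_, ?_, ?_⟩
      · simp [colF, List.filter_cons, hgetD, hv, hset0]
      · intro c' hne h0
        have : PySem.List.pyGetD (row.set c.toNat 0) c' 0 = PySem.List.pyGetD row c' 0 := by
          rw [pyGetD_toNat _ c' 0 h0, pyGetD_toNat _ c' 0 h0, List.getD_eq_getElem?_getD,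
              List.getD_eq_getElem?_getD, List.getElem?_set_ne (by omega)]
        simp [colF, List.filter_cons, this]
      · intro r hr
        rcases List.mem_cons.mp hr with rfl | hr
        · simpa using hrow
        · exact hshape r (by simp [hr])

theorem loop_eq (w : Nat) :
    ∀ (ms : List Int) (d : PySem.Dict Int (List Int)) (g : List (List Int)) (ans : Int) (stack : List Int),
      (∀ r ∈ g, w ≤ r.length) →
      (∀ c : Int, d.getD c [] = colOf w g c) →
      (ms.foldl stepA (d, ans, stack)).2 = (ms.foldl (stepB w) (g, ans, stack)).2 := by
  intro ms
  induction ms with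
  | nil => intros; rfl
  | cons m ms ih =>
    intro d g ans stack hshape hinv
    rw [List.foldl_cons, List.foldl_cons]
    by_cases hr : 0 ≤ m - 1 ∧ m - 1 < (w : Int)
    · have hlst : d.getD (m - 1) [] = (colF (m - 1) g).reverse := by
        rw [hinv]; unfold colOf; rw [if_pos hr]
      obtain ⟨hnone, hsome⟩ := pick_spec (m - 1) w hr.1 hr.2 g hshape
      have hBguard : ¬ (m - 1 < 0 ∨ (w : Int) ≤ m - 1) := by omega
      cases hp : pickB (m - 1) g with
      | none =>
        have hF := hnone hp
        have hA : stepA (d, ans, stack) m = (d, ans, stack) := by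
          simp [stepA, hlst, hF]
        have hB : stepB w (g, ans, stack) m = (g, ans, stack) := by
          simp [stepB, hBguard, hp]
        rw [hA, hB]; exact ih d g ans stack hshape hinv
      | some pr =>
        obtain ⟨v, g'⟩ := pr
        obtain ⟨hFg, hother, hshape'⟩ := hsome v g' hp
        have hlst2 : d.getD (m - 1) [] = (colF (m - 1) g').reverse ++ [v] := by
          rw [hlst, hFg]; simp
        have hinv' : ∀ c : Int, (d.insert (m - 1) (colF (m - 1) g').reverse).getD c [] = colOf w g' c := by
          intro c
          rw [PySem.Dict.getD_insert]
          by_cases hc : c = m - 1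
          · subst hc; rw [if_pos rfl]; unfold colOf; rw [if_pos hr]
          · rw [if_neg hc, hinv c]
            unfold colOf
            by_cases hcr : 0 ≤ c ∧ c < (w : Int)
            · simp [hcr, hother c hc hcr.1]
            · simp [hcr]
        by_cases hst : stack ≠ [] ∧ stack.getLast? = some v
        · have hA : stepA (d, ans, stack) m
              = (d.insert (m - 1) (colF (m - 1) g').reverse, ans + 2, stack.dropLast) := by
            simp [stepA, hlst2, hst, List.getLast?_concat, List.dropLast_concat]
          have hB : stepB w (g, ans, stack) m = (g', ans + 2, stack.dropLast) := by
            simp [stepB, hp, hst]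
            omega
          rw [hA, hB]; exact ih _ _ _ _ hshape' hinv'
        · have hA : stepA (d, ans, stack) m
              = (d.insert (m - 1) (colF (m - 1) g').reverse, ans, stack ++ [v]) := by
            simp [stepA, hlst2, hst, List.getLast?_concat, List.dropLast_concat]
          have hB : stepB w (g, ans, stack) m = (g', ans, stack ++ [v]) := by
            simp [stepB, hp, hst]
            omega
          rw [hA, hB]; exact ih _ _ _ _ hshape' hinv'
    · have hA : stepA (d, ans, stack) m = (d, ans, stack) := by
        have hlst : d.getD (m - 1) [] = [] := by
          rw [hinv]; unfold colOf; rw [if_neg hr]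
        simp [stepA, hlst]
      have hB : stepB w (g, ans, stack) m = (g, ans, stack) := by
        simp only [stepB]
        rw [if_pos (by omega : m - 1 < 0 ∨ (w : Int) ≤ m - 1)]
      rw [hA, hB]; exact ih d g ans stack hshape hinv

-- ===== VERDICT (by name: the statement is the Claim_ definition above) =====
theorem solution_spec : Claim_equal_solution := by
  intro board moves _ hPre
  unfold Spec_solution solution solution_alt
  have hhead : PySem.List.pyGetD board 0 [] = board.headD [] := by
    cases board with
    | nil => exact absurd rfl hPre.1
    | cons r rest => simp [PySem.List.pyGetD, PySem.List.pyGet?, PySem.List.pyIdx?]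
  have h2 := loop_eq (PySem.List.pyGetD board 0 []).length moves (buildDict board) board 0 []
    (by rw [hhead]; exact hPre.2) (fun c => build_getD board c)
  exact congrArg Prod.fst h2
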